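-- pv_equiv track=rewrite | github.com/spoofer-ix/spoofer-ix | fullcone-imc17/trie.py | intip2ipstr
-- ===== SOURCE A (Python) =====
-- def intip2ipstr(intip):
--     """helper method to convert integer representation of IP back to IP string"""
--     div = 1 << 24
--     octets = []
--     while div:
--         octet, intip = divmod(intip, div)
--         octets.append(str(octet))
--         div >>= 8
--     return ".".join(octets)
-- ===== SOURCE B (Python) =====
-- def intip2ipstr(intip):
--     """helper method to convert integer representation of IP back to IP string"""
--     return ".".join(str(o) for o in (intip >> 24, (intip >> 16) & 0xFF, (intip >> 8) & 0xFF, intip & 0xFF))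
-- ===== Notes on version B (the rewrite author's own statement) =====
-- stated objective: idiomatic
-- what changed: Replaces the while loop threading a divmod remainder through mutable state with a stateless closed form computing the four octets independently by arithmetic shifts and masks (top octet unmasked to preserve divmod's quotient for negative/large inputs).
import Mathlib
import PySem

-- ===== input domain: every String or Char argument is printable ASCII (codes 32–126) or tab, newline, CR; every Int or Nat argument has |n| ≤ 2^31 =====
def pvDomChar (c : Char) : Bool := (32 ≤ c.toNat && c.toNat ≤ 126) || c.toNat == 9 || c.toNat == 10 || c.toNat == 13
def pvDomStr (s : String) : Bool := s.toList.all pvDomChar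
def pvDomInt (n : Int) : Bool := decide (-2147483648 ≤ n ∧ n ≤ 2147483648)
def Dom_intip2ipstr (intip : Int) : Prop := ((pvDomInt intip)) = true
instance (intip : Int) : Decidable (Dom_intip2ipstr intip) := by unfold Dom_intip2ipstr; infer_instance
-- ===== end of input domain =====

-- B replaces A's divmod while-loop (threaded remainder state) by a stateless closed form:
-- four independent shift/mask octets; same return value for every int (idiomatic, not faster).

-- ===== PORT A =====
-- the while loop: state = (div, intip, octets); div >>= 8 each round, stop when div = 0
def intip2ipstrLoop (div : Nat) (intip : Int) (octets : List String) : List String :=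
  if div = 0 then octets
  else intip2ipstrLoop (div >>> 8) (PySem.Int.mod intip div)
        (octets ++ [PySem.Int.toStr (PySem.Int.floordiv intip div)])
termination_by div
decreasing_by simp [Nat.shiftRight_eq_div_pow]; omega

def intip2ipstr (intip : Int) : String :=
  PySem.Str.join "." (intip2ipstrLoop (1 <<< 24) intip [])

-- ===== PORT B =====
-- Python's x >> k is floor division by 2^k (PySem.Int.floordiv); x & 0xFF on an int is
-- exactly x mod 256 with Python's floor mod (PySem.Int.mod) — both ports are exact.
def intip2ipstr_alt (intip : Int) : String :=
  PySem.Str.join "."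
    ([PySem.Int.floordiv intip 16777216,
      PySem.Int.mod (PySem.Int.floordiv intip 65536) 256,
      PySem.Int.mod (PySem.Int.floordiv intip 256) 256,
      PySem.Int.mod intip 256].map PySem.Int.toStr)

-- ===== PRECONDITION & SPEC =====
def Spec_intip2ipstr (intip : Int) (out : String) : Prop := out = intip2ipstr_alt intip
instance (intip : Int) (out : String) : Decidable (Spec_intip2ipstr intip out) := by unfold Spec_intip2ipstr; infer_instance

-- ===== CLAIM (what is proved, stated in full; the proofs are below) =====
def Claim_equal_intip2ipstr : Prop := ∀ (intip : Int), Dom_intip2ipstr intip → Spec_intip2ipstr intip (intip2ipstr intip)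

-- ===== LEMMAS AND PROOFS =====

theorem loop_unfold (div : Nat) (intip : Int) (octets : List String) (h : div ≠ 0) :
    intip2ipstrLoop div intip octets =
      intip2ipstrLoop (div >>> 8) (PySem.Int.mod intip div)
        (octets ++ [PySem.Int.toStr (PySem.Int.floordiv intip div)]) := by
  rw [intip2ipstrLoop]; simp [h]

-- ===== VERDICT (by name: the statement is the Claim_ definition above) =====
theorem intip2ipstr_spec : Claim_equal_intip2ipstr := by
  intro intip _
  unfold Spec_intip2ipstr intip2ipstr intip2ipstr_alt
  rw [show ((1 : Nat) <<< 24) = 16777216 from rfl,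
      loop_unfold 16777216 _ _ (by norm_num),
      show ((16777216 : Nat) >>> 8) = 65536 from rfl,
      loop_unfold 65536 _ _ (by norm_num),
      show ((65536 : Nat) >>> 8) = 256 from rfl,
      loop_unfold 256 _ _ (by norm_num),
      show ((256 : Nat) >>> 8) = 1 from rfl,
      loop_unfold 1 _ _ (by norm_num),
      show ((1 : Nat) >>> 8) = 0 from rfl,
      intip2ipstrLoop]
  simp only [List.nil_append, List.cons_append, List.map]
  norm_num
  rw [show intip % 16777216 / 65536 = intip / 65536 % 256 by omega,
      show intip % 65536 / 256 = intip / 256 % 256 by omega]
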